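-- pv_equiv track=rewrite | github.com/vseloved/prj-nlp-2020 | students/DmytroMindra/03-data/inter-annotator-agreement/inter-annotator-agreement.py | get_vectors_for_all_corrections
-- ===== SOURCE A (Python) =====
-- POSITIVE_VALUE = 1
--
-- NEGATIVE_VALUE = 0
--
-- def get_vectors_for_all_corrections(by_annotator, distinct_corrections):
--     vectors = []
--     for annotator in by_annotator:
--         vector = []
--         for correction in distinct_corrections:
--             if correction in by_annotator[annotator]:
--                 vector.append(POSITIVE_VALUE)
--             else:
--                 vector.append(NEGATIVE_VALUE)
--         vectors.append(vector)
--     return vectors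
-- ===== SOURCE B (Python) =====
-- POSITIVE_VALUE = 1
--
-- NEGATIVE_VALUE = 0
--
-- def get_vectors_for_all_corrections(by_annotator, distinct_corrections):
--     n = len(distinct_corrections)
--     pos = {}
--     for i, c in enumerate(distinct_corrections):
--         pos.setdefault(c, []).append(i)
--     vectors = []
--     for corrections in by_annotator.values():
--         vector = [NEGATIVE_VALUE] * n
--         for c in corrections:
--             for i in pos.get(c, ()):
--                 vector[i] = POSITIVE_VALUE
--         vectors.append(vector)
--     return vectors
-- ===== Notes on version B (the rewrite author's own statement) =====
-- stated objective: alternative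
-- what changed: B builds a correction->positions index of distinct_corrections once and, per annotator, scatters that annotator's own corrections into a zero-filled vector, instead of scanning every distinct correction and testing membership in the annotator's list.
import Mathlib
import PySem

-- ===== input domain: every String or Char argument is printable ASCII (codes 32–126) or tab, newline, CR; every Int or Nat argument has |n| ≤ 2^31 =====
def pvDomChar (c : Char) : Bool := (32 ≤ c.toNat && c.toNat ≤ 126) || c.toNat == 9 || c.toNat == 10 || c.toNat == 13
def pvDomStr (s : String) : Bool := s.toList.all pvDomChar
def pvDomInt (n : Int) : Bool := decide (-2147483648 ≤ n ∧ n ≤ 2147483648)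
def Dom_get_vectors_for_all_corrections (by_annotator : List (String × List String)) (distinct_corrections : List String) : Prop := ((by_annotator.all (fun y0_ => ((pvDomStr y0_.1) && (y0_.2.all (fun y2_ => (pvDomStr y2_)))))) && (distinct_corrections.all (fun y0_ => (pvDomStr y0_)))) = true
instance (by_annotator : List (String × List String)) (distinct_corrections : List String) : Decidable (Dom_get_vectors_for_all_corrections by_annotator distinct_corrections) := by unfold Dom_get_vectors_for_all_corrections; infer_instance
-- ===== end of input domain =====

-- B builds a position index of distinct_corrections once and scatters each annotator's own
-- corrections into a zero-filled vector, instead of scanning every distinct correction and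
-- testing membership in the annotator's list (objective: alternative decomposition).

-- ===== PORT A =====
-- by_annotator[annotator]: first-match lookup in the association list (Python dict lookup)
def pvLookup (d : List (String × List String)) (k : String) : List String :=
  match d with
  | [] => []
  | (k', v) :: rest => if k' == k then v else pvLookup rest k

def get_vectors_for_all_corrections (by_annotator : List (String × List String)) (distinct_corrections : List String) : List (List Int) :=
  by_annotator.foldl
    (fun vectors p =>
      vectors ++
        [distinct_corrections.foldl
          (fun vector correction =>
            if (pvLookup by_annotator p.1).contains correction then vector ++ [(1 : Int)]
            else vector ++ [(0 : Int)])
          []])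
    []

-- ===== PORT B =====
def get_vectors_for_all_corrections_alt (by_annotator : List (String × List String)) (distinct_corrections : List String) : List (List Int) :=
  let n := distinct_corrections.length
  let pos := (PySem.List.enumerate distinct_corrections 0).foldl
    (fun d p => d.modify p.2 [] (· ++ [p.1])) (PySem.Dict.empty : PySem.Dict String (List Int))
  by_annotator.foldl
    (fun vectors p =>
      vectors ++
        [p.2.foldl
          (fun vector c =>
            (pos.getD c []).foldl (fun v i => PySem.List.pySetD v i (1 : Int)) vector)
          (List.replicate n (0 : Int))])
    []

-- ===== PRECONDITION & SPEC =====
-- Pre_: by_annotator is a Python dict, so its association-list image always has pairwise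
-- distinct keys; this excludes no input the Python function can receive.
def Pre_get_vectors_for_all_corrections (by_annotator : List (String × List String)) (distinct_corrections : List String) : Prop :=
  (by_annotator.map Prod.fst).Nodup

instance (by_annotator : List (String × List String)) (distinct_corrections : List String) : Decidable (Pre_get_vectors_for_all_corrections by_annotator distinct_corrections) := by unfold Pre_get_vectors_for_all_corrections; infer_instance

def pvWitness_get_vectors_for_all_corrections : (List (String × List String)) × List String :=
  ([("ann1", ["x", "z"]), ("ann2", ["y"])], ["x", "y", "z"])

def Spec_get_vectors_for_all_corrections (by_annotator : List (String × List String)) (distinct_corrections : List String) (out : List (List Int)) : Prop := out = get_vectors_for_all_corrections_alt by_annotator distinct_corrections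
instance (by_annotator : List (String × List String)) (distinct_corrections : List String) (out : List (List Int)) : Decidable (Spec_get_vectors_for_all_corrections by_annotator distinct_corrections out) := by unfold Spec_get_vectors_for_all_corrections; infer_instance

-- ===== CLAIM (what is proved, stated in full; the proofs are below) =====
def Claim_equal_get_vectors_for_all_corrections : Prop := ∀ (by_annotator : List (String × List String)) (distinct_corrections : List String), Dom_get_vectors_for_all_corrections by_annotator distinct_corrections → Pre_get_vectors_for_all_corrections by_annotator distinct_corrections → Spec_get_vectors_for_all_corrections by_annotator distinct_corrections (get_vectors_for_all_corrections by_annotator distinct_corrections)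

-- ===== LEMMAS AND PROOFS =====

-- first-match lookup returns the pair's own value when keys are distinct
lemma pvLookup_of_mem (d : List (String × List String)) (k : String) (v : List String)
    (hnd : (d.map Prod.fst).Nodup) (hmem : (k, v) ∈ d) : pvLookup d k = v := by
  induction d with
  | nil => cases hmem
  | cons p rest ih =>
    simp only [List.map_cons, List.nodup_cons] at hnd
    rcases List.mem_cons.mp hmem with h | h
    · rw [← h]; simp [pvLookup]
    · have hk : p.1 ≠ k := by
        intro he
        have hmemk : k ∈ rest.map Prod.fst := List.mem_map_of_mem h
        exact hnd.1 (he ▸ hmemk)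
      simp only [pvLookup, beq_iff_eq, if_neg hk]
      exact ih hnd.2 h

-- the position index: for each c, exactly the positions of c in dc, as Int indices
lemma pvPos_getD (dc : List String) (c : String) :
    (((PySem.List.enumerate dc 0).foldl (fun d p => d.modify p.2 [] (· ++ [p.1]))
        (PySem.Dict.empty : PySem.Dict String (List Int))).getD c [])
      = (((PySem.List.enumerate dc 0).filter (fun p => p.2 == c)).map (·.1)) := by
  have h := PySem.Dict.getD_foldl_modify_append
    (l := (PySem.List.enumerate dc 0).map (fun p => (p.2, p.1)))
    (d := (PySem.Dict.empty : PySem.Dict String (List Int))) (c := c)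
  rw [List.foldl_map] at h
  simp only [PySem.Dict.getD_empty, List.nil_append, List.filter_map, List.map_map] at h
  simpa [Function.comp] using h

-- membership in those indices
lemma mem_pvPos_iff (dc : List String) (c : String) (j : Nat) :
    ((j : Int) ∈ (((PySem.List.enumerate dc 0).filter (fun p => p.2 == c)).map (·.1)))
      ↔ (j < dc.length ∧ dc[j]? = some c) := by
  simp only [List.mem_map, List.mem_filter, PySem.List.mem_enumerate_iff]
  constructor
  · rintro ⟨p, ⟨⟨k, hk, rfl⟩, hc⟩, hj⟩
    simp only [beq_iff_eq] at hc
    simp only [zero_add] at hj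
    have hkj : k = j := by exact_mod_cast hj
    subst hkj
    exact ⟨hk, by rw [List.getElem?_eq_getElem hk]; exact congrArg some hc⟩
  · rintro ⟨hj, hc⟩
    refine ⟨((j : Int), dc[j]), ⟨⟨j, hj, by simp⟩, ?_⟩, rfl⟩
    simp only [beq_iff_eq]
    rw [List.getElem?_eq_getElem hj] at hc
    exact Option.some.inj hc

-- indices produced by the index are nonnegative
lemma pvPos_nonneg (dc : List String) (c : String) :
    ∀ i ∈ (((PySem.List.enumerate dc 0).filter (fun p => p.2 == c)).map (·.1)), 0 ≤ i := by
  intro i hi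
  simp only [List.mem_map, List.mem_filter, PySem.List.mem_enumerate_iff] at hi
  obtain ⟨p, ⟨⟨k, hk, rfl⟩, _⟩, rfl⟩ := hi
  simp

-- scattering 1s at a list of nonnegative indices, pointwise
lemma scatter_getElem? (is : List Int) (w : List Int) (j : Nat)
    (hnn : ∀ i ∈ is, 0 ≤ i) :
    (is.foldl (fun v i => PySem.List.pySetD v i (1 : Int)) w)[j]?
      = if (j : Int) ∈ is then (if j < w.length then some 1 else none) else w[j]? := by
  induction is generalizing w with
  | nil => simp
  | cons i rest ih =>
    have hi : 0 ≤ i := hnn i (by simp)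
    have hrest : ∀ x ∈ rest, 0 ≤ x := fun x hx => hnn x (by simp [hx])
    simp only [List.foldl_cons]
    rw [ih _ hrest, PySem.List.pySetD_of_nonneg (h := hi)]
    by_cases hjr : (j : Int) ∈ rest
    · simp [hjr, List.mem_cons, List.length_set]
    · by_cases hij : i.toNat = j
      · have hji : (j : Int) = i := by omega
        simp [hji, List.getElem?_set, hij]
      · have hji : ¬ ((j : Int) = i) := by omega
        simp [hjr, hji, hij]

-- length is preserved by the scatter
lemma scatter_length (is : List Int) (w : List Int) :
    (is.foldl (fun v i => PySem.List.pySetD v i (1 : Int)) w).length = w.length := by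
  induction is generalizing w with
  | nil => rfl
  | cons i rest ih => simp [List.foldl_cons, ih, PySem.List.length_pySetD]

-- B's inner loop, pointwise: index j holds 1 iff dc[j] has appeared in the processed corrections
lemma innerB_getElem? (dc : List String) (u : List String) (w : List Int) (j : Nat)
    (hw : w.length = dc.length) :
    (u.foldl (fun vector c =>
        ((((PySem.List.enumerate dc 0).foldl (fun d p => d.modify p.2 [] (· ++ [p.1]))
            (PySem.Dict.empty : PySem.Dict String (List Int))).getD c [])).foldl
          (fun v i => PySem.List.pySetD v i (1 : Int)) vector) w)[j]?
      = dite (j < dc.length) (fun hj => if dc[j] ∈ u then some 1 else w[j]?) (fun _ => none) := by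
  induction u generalizing w with
  | nil =>
    by_cases hj : j < dc.length
    · simp only [List.foldl_nil, List.not_mem_nil, if_false, dif_pos hj]
    · simp only [List.foldl_nil, dif_neg hj]
      exact List.getElem?_eq_none (by omega)
  | cons c rest ih =>
    simp only [List.foldl_cons]
    rw [ih _ (by rw [scatter_length]; exact hw)]
    rw [pvPos_getD, scatter_getElem? _ _ _ (pvPos_nonneg dc c)]
    simp only [mem_pvPos_iff]
    by_cases hj : j < dc.length
    · have hjw : j < w.length := by omega
      simp only [dif_pos hj, List.mem_cons, hjw, if_true, List.getElem?_eq_getElem hj,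
        Option.some.injEq]
      by_cases hcm : dc[j] ∈ rest
      · simp [hcm]
      · by_cases hce : dc[j] = c
        · simp [hce]
          intro _ h
          exact absurd h (by omega)
        · simp [hcm, hce]
    · simp [hj]

-- B's inner loop equals A's inner membership map
lemma inner_eq (dc : List String) (v : List String) :
    (v.foldl (fun vector c =>
        ((((PySem.List.enumerate dc 0).foldl (fun d p => d.modify p.2 [] (· ++ [p.1]))
            (PySem.Dict.empty : PySem.Dict String (List Int))).getD c [])).foldl
          (fun w i => PySem.List.pySetD w i (1 : Int)) vector)
      (List.replicate dc.length (0 : Int)))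
      = dc.map (fun c => if v.contains c then (1 : Int) else 0) := by
  apply List.ext_getElem?
  intro j
  rw [innerB_getElem? dc v _ j (by simp)]
  by_cases hj : j < dc.length
  · rw [List.getElem?_map, List.getElem?_eq_getElem hj]
    simp only [dif_pos hj, Option.map_some]
    by_cases hm : dc[j] ∈ v
    · simp [hm]
    · simp [hm, hj]
  · rw [dif_neg hj, List.getElem?_map, List.getElem?_eq_none (by omega)]
    rfl

-- ===== VERDICT (by name: the statement is the Claim_ definition above) =====
theorem get_vectors_for_all_corrections_spec : Claim_equal_get_vectors_for_all_corrections := by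
  intro ba dc _ hpre
  unfold Spec_get_vectors_for_all_corrections
  unfold get_vectors_for_all_corrections get_vectors_for_all_corrections_alt
  rw [PySem.List.foldl_append_singleton_eq_map, PySem.List.foldl_append_singleton_eq_map,
    List.nil_append, List.nil_append]
  apply List.map_congr_left
  intro p hp
  have hAleft : (fun (vector : List Int) (correction : String) =>
      if (pvLookup ba p.1).contains correction = true then vector ++ [(1 : Int)]
      else vector ++ [(0 : Int)])
    = (fun vector correction =>
        vector ++ [if (pvLookup ba p.1).contains correction = true then (1 : Int) else 0]) := by
    funext vector correction
    split_ifs <;> rfl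
  rw [hAleft, PySem.List.foldl_append_singleton_eq_map, List.nil_append]
  have hlook : pvLookup ba p.1 = p.2 :=
    pvLookup_of_mem ba p.1 p.2 hpre (by simpa using hp)
  rw [hlook, inner_eq dc p.2]
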